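-- pv_equiv track=rewrite | github.com/Sapphirerain/adventofcode | day4.py | has_double
-- ===== SOURCE A (Python) =====
-- def has_double(num_str):
--     i = 0
--     chain = 1
--
--     # iterate through string until an identical pair is found
--     while (i < len(num_str) - 1):
--         if chain == 2 and num_str[i] != num_str[i + 1]:
--             return True
--         if num_str[i] == num_str[i + 1]:
--             chain += 1
--         else:
--             chain = 1
--         i += 1
--
--     # catch doubles at the end
--     if chain == 2:
--         return True
--     return False
-- ===== SOURCE B (Python) =====
-- def has_double(num_str):
--     padded = [None] + list(num_str) + [None, None]
--     return any(b == c and a != b and c != d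
--                for a, b, c, d in zip(padded, padded[1:], padded[2:], padded[3:]))
-- ===== Notes on version B (the rewrite author's own statement) =====
-- stated objective: alternative
-- what changed: Replaced A's index/chain while-loop state machine with a stateless sliding-window pass: pad the string with sentinels and test every 4-character window (a,b,c,d) for an isolated equal pair b==c with a!=b and c!=d; the windows come from zip running in C instead of per-character Python indexing.
import Mathlib
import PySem

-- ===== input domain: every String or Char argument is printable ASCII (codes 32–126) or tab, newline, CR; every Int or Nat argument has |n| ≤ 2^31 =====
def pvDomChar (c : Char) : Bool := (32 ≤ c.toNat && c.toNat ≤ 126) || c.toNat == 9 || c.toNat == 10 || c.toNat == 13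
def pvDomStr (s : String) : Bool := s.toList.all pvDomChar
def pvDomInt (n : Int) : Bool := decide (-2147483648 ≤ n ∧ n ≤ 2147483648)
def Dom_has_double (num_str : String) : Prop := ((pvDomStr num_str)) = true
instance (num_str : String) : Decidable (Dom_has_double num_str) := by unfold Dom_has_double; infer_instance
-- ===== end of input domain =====

-- B replaces A's index/chain while-loop state machine with a stateless sliding-window test
-- over a sentinel-padded sequence (alternative decomposition, same cost).

-- ===== PORT A =====
-- the while loop: looks at s[i], s[i+1]; recursion on the suffix starting at i carries the same state
def hdLoop : List Char → Nat → Bool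
  | c1 :: c2 :: rest, chain =>
    if chain == 2 && !(c1 == c2) then true
    else hdLoop (c2 :: rest) (if c1 == c2 then chain + 1 else 1)
  | _, chain => chain == 2

def has_double (num_str : String) : Bool := hdLoop num_str.toList 1

-- ===== PORT B =====
-- zip(padded, padded[1:], padded[2:], padded[3:]) of Python, as a 4-way zip
def zip4 {α β γ δ : Type} : List α → List β → List γ → List δ → List (α × β × γ × δ)
  | a :: as, b :: bs, c :: cs, d :: ds => (a, b, c, d) :: zip4 as bs cs ds
  | _, _, _, _ => []

def has_double_alt (num_str : String) : Bool :=
  let padded : List (Option Char) := none :: num_str.toList.map some ++ [none, none]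
  (zip4 padded (padded.drop 1) (padded.drop 2) (padded.drop 3)).any
    (fun w => w.2.1 == w.2.2.1 && !(w.1 == w.2.1) && !(w.2.2.1 == w.2.2.2))

-- ===== PRECONDITION & SPEC =====
def Spec_has_double (num_str : String) (out : Bool) : Prop := out = has_double_alt num_str
instance (num_str : String) (out : Bool) : Decidable (Spec_has_double num_str out) := by unfold Spec_has_double; infer_instance

-- ===== CLAIM (what is proved, stated in full; the proofs are below) =====
def Claim_equal_has_double : Prop := ∀ (num_str : String), Dom_has_double num_str → Spec_has_double num_str (has_double num_str)

-- ===== LEMMAS AND PROOFS =====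
-- proof-only helpers: "an isolated equal pair exists", scanned with one bit of left context
def lookNe (c : Char) : List Char → Bool
  | [] => true
  | e :: _ => !(c == e)

def hdGo : Bool → List Char → Bool
  | prev, a :: b :: t => ((a == b) && !prev && lookNe b t) || hdGo (a == b) (b :: t)
  | _, _ => false

-- the sliding window over the padded list computes hdGo
theorem win_eq_go (rest : List Char) (c : Char) (x : Option Char) :
    (zip4 (x :: some c :: rest.map some ++ [none, none])
          (some c :: rest.map some ++ [none, none])
          (rest.map some ++ [none, none])
          ((rest.map some ++ [none, none]).drop 1)).any
      (fun w => w.2.1 == w.2.2.1 && !(w.1 == w.2.1) && !(w.2.2.1 == w.2.2.2))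
    = hdGo (x == some c) (c :: rest) := by
  induction rest generalizing c x with
  | nil => simp [zip4, hdGo]
  | cons d rest ih =>
    cases rest with
    | nil =>
      simp [zip4, hdGo, lookNe]
    | cons e rest' =>
      have h1 := ih d (some c)
      simp [zip4] at h1 ⊢
      rw [h1]
      simp [hdGo, lookNe]

-- A's loop with run-length state computes the same existence test as hdGo
theorem hdLoop_eq_go (rest : List Char) (c : Char) (chain : Nat) (h : 1 ≤ chain) :
    hdLoop (c :: rest) chain
      = (((chain == 2) && lookNe c rest) || hdGo (decide (2 ≤ chain)) (c :: rest)) := by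
  induction rest generalizing c chain with
  | nil => simp [hdLoop, hdGo, lookNe]
  | cons d rest ih =>
    by_cases hcd : c = d
    · subst hcd
      rw [show hdLoop (c :: c :: rest) chain = hdLoop (c :: rest) (chain + 1) by
        simp [hdLoop]]
      rw [ih c (chain + 1) (by omega)]
      rw [show hdGo (decide (2 ≤ chain)) (c :: c :: rest)
        = ((!decide (2 ≤ chain) && lookNe c rest) || hdGo true (c :: rest)) by
          simp [hdGo]]
      by_cases hc : chain = 1
      · subst hc; simp [lookNe]
      · have h5 : decide (2 ≤ chain) = true := by simp; omega
        have h6 : (chain + 1 == 2) = false := by simp; omega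
        have h7 : decide (1 ≤ chain) = true := by simp; omega
        simp [h5, h6, h7, lookNe]
    · have hcd' : (c == d) = false := by simp [hcd]
      rw [show hdLoop (c :: d :: rest) chain
        = (if chain == 2 then true else hdLoop (d :: rest) 1) by
          simp [hdLoop, hcd']]
      rw [show hdGo (decide (2 ≤ chain)) (c :: d :: rest) = hdGo false (d :: rest) by
        simp [hdGo, hcd']]
      rw [ih d 1 (le_refl 1)]
      by_cases hc : chain = 2
      · simp [hc, lookNe, hcd']
      · simp [show (chain == 2) = false by simp [hc], lookNe, hcd']

-- ===== VERDICT (by name: the statement is the Claim_ definition above) =====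
theorem has_double_spec : Claim_equal_has_double := by
  intro s _
  unfold Spec_has_double has_double has_double_alt
  cases hs : s.toList with
  | nil => simp [hdLoop, zip4]
  | cons c rest =>
    have h1 := win_eq_go rest c none
    have h2 := hdLoop_eq_go rest c 1 (le_refl 1)
    simp only [show ((none : Option Char) == some c) = false from rfl] at h1
    simp only [show decide (2 ≤ 1) = false from rfl, show ((1 : Nat) == 2) = false from rfl,
      Bool.false_and, Bool.false_or] at h2
    exact h2.trans h1.symm
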